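-- pv_equiv track=rewrite | github.com/franzjack/power_grids_data | pg_utils.py | bus_remap
-- ===== SOURCE A (Python) =====
-- def bus_remap(bus_index,bus_i,tlist,flist):
--     for j in range(len(tlist)):
--         for i in range(len(bus_i)):
--             if tlist[j]==bus_i[i]:
--                 tlist[j] = bus_index[i]
--                 j+1
--     for j in range(len(flist)):
--         for i in range(len(bus_i)):
--             if flist[j]==bus_i[i]:
--                 flist[j] = bus_index[i]
--                 j+1
--     return(flist,tlist)
-- ===== SOURCE B (Python) =====
-- def bus_remap(bus_index, bus_i, tlist, flist):
--     # Compose all substitution steps into ONE lookup table by a single backward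
--     # pass: after processing pair (old, new), table.get(v, v) equals the result
--     # of chaining v through the remaining (later) pairs; so at the end
--     # table.get(v, v) is the full chained substitution of v.
--     table = {}
--     for old, new in reversed(list(zip(bus_i, bus_index))):
--         table[old] = table.get(new, new)
--     return ([table.get(v, v) for v in flist], [table.get(v, v) for v in tlist])
-- ===== Notes on version B (the rewrite author's own statement) =====
-- stated objective: faster
-- what changed: Instead of chaining each element of tlist/flist through an in-order scan of the pairs (A rescans bus_i per element), B composes ALL substitution steps into one lookup dict by a single backward pass over zip(bus_i, bus_index) (table[old] = table.get(new, new)), then maps both lists with one O(1) lookup per element; B does not mutate tlist/flist, the return value is identical.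
-- outside the precondition, e.g. on bus_remap([], [1], [], [2]): A returns ([2], []), B returns ([2], [])
import Mathlib
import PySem

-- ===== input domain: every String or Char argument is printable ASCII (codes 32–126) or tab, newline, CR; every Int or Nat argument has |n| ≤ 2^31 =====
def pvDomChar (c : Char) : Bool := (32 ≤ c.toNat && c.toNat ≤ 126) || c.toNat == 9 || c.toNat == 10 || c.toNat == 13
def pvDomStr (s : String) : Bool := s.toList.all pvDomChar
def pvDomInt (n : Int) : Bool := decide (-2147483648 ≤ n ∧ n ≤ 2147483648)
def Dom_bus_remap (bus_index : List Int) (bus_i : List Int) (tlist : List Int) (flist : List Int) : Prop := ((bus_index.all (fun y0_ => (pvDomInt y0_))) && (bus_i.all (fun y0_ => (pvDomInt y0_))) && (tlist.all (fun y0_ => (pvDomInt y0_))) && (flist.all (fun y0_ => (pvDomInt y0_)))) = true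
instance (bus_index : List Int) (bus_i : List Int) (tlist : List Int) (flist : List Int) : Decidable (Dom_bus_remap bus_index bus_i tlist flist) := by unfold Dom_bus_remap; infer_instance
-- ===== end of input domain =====

-- B replaces A's per-element rescans of bus_i by composing all substitution steps into ONE lookup
-- dict in a single backward pass over the pairs, then maps both lists with one lookup per element
-- (asymptotically faster; A mutates tlist and flist in place while B does not — the equivalence
-- proved here is about the return value only).


-- ===== PORT A =====
-- inner 'for i in range(len(bus_i))' loop acting on the list at position j
def busInnerA (bus_index : List Int) (bus_i : List Int) (lst : List Int) (j : Int) : List Int :=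
  (PySem.List.pyRange 0 (PySem.List.len bus_i) 1).foldl
    (fun l i =>
      if PySem.List.pyGetD l j 0 = PySem.List.pyGetD bus_i i 0
      then PySem.List.pySetD l j (PySem.List.pyGetD bus_index i 0)
      else l) lst

-- one 'for j in range(len(lst))' pass (range(len(..)) is evaluated once; lengths are preserved)
def busPassA (bus_index : List Int) (bus_i : List Int) (lst : List Int) : List Int :=
  (PySem.List.pyRange 0 (PySem.List.len lst) 1).foldl (busInnerA bus_index bus_i) lst

def bus_remap (bus_index : List Int) (bus_i : List Int) (tlist : List Int) (flist : List Int) : List Int × List Int :=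
  let t := busPassA bus_index bus_i tlist
  let f := busPassA bus_index bus_i flist
  (f, t)

-- ===== PORT B =====
-- 'for old, new in reversed(list(zip(bus_i, bus_index))): table[old] = table.get(new, new)'
def busTableB (bus_i : List Int) (bus_index : List Int) : PySem.Dict Int Int :=
  (bus_i.zip bus_index).reverse.foldl
    (fun d p => PySem.Dict.insert d p.1 (PySem.Dict.getD d p.2 p.2)) PySem.Dict.empty

def bus_remap_alt (bus_index : List Int) (bus_i : List Int) (tlist : List Int) (flist : List Int) : List Int × List Int :=
  let table := busTableB bus_i bus_index
  (flist.map (fun v => PySem.Dict.getD table v v),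
   tlist.map (fun v => PySem.Dict.getD table v v))

-- ===== PRECONDITION & SPEC =====
-- Pre_ excludes bus_i longer than bus_index: there A raises IndexError whenever a (chained) value
-- matches an entry of bus_i past the end of bus_index; it also excludes some inputs where no such
-- match occurs and A still returns — on those both programs return the same value anyway.
def Pre_bus_remap (bus_index : List Int) (bus_i : List Int) (tlist : List Int) (flist : List Int) : Prop :=
  bus_i.length ≤ bus_index.length
instance (bus_index : List Int) (bus_i : List Int) (tlist : List Int) (flist : List Int) : Decidable (Pre_bus_remap bus_index bus_i tlist flist) := by unfold Pre_bus_remap; infer_instance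

def pvWitness_bus_remap : List Int × List Int × List Int × List Int :=
  ([10, 20], [1, 2], [1, 2, 3], [2, 2, 5])

def Spec_bus_remap (bus_index : List Int) (bus_i : List Int) (tlist : List Int) (flist : List Int) (out : List Int × List Int) : Prop := out = bus_remap_alt bus_index bus_i tlist flist
instance (bus_index : List Int) (bus_i : List Int) (tlist : List Int) (flist : List Int) (out : List Int × List Int) : Decidable (Spec_bus_remap bus_index bus_i tlist flist out) := by unfold Spec_bus_remap; infer_instance

-- ===== CLAIM (what is proved, stated in full; the proofs are below) =====
def Claim_equal_bus_remap : Prop := ∀ (bus_index : List Int) (bus_i : List Int) (tlist : List Int) (flist : List Int), Dom_bus_remap bus_index bus_i tlist flist → Pre_bus_remap bus_index bus_i tlist flist → Spec_bus_remap bus_index bus_i tlist flist (bus_remap bus_index bus_i tlist flist)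

-- ===== LEMMAS AND PROOFS =====

-- proof-side characterisation: the in-order substitution chain of one value through the pairs
def busChainB (pairs : List (Int × Int)) (v : Int) : Int :=
  pairs.foldl (fun x p => if x = p.1 then p.2 else x) v

theorem busFoldPairs_eq_set (pairs : List (Int × Int)) (lst : List Int) (j : Nat) (hj : j < lst.length) :
    pairs.foldl (fun l p => if l.getD j 0 = p.1 then l.set j p.2 else l) lst
      = lst.set j (busChainB pairs (lst.getD j 0)) := by
  induction pairs generalizing lst with
  | nil =>
    rw [List.foldl_nil, List.getD_eq_getElem lst 0 hj]
    exact (List.set_getElem_self hj).symm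
  | cons p ps ih =>
    rw [List.foldl_cons]
    have hchain : busChainB (p :: ps) (lst.getD j 0)
        = busChainB ps (if lst.getD j 0 = p.1 then p.2 else lst.getD j 0) := by
      simp [busChainB]
    rw [hchain]
    by_cases h : lst.getD j 0 = p.1
    · rw [if_pos h, if_pos h, ih _ (by simpa using hj)]
      have : (lst.set j p.2).getD j 0 = p.2 := by
        rw [List.getD_eq_getElem _ 0 (by simpa using hj)]; simp
      rw [this, List.set_set]
    · rw [if_neg h, if_neg h, ih _ hj]

theorem busInnerA_eq (bus_index bus_i lst : List Int) (j : Nat)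
    (hle : bus_i.length ≤ bus_index.length) (hj : j < lst.length) :
    busInnerA bus_index bus_i lst (j : Int)
      = lst.set j (busChainB (bus_i.zip bus_index) (lst.getD j 0)) := by
  unfold busInnerA
  have hzlen : (bus_i.zip bus_index).length = bus_i.length := by
    simp [List.length_zip]; omega
  have hbody : (PySem.List.pyRange 0 (PySem.List.len bus_i) 1).foldl
      (fun l i =>
        if PySem.List.pyGetD l (j : Int) 0 = PySem.List.pyGetD bus_i i 0
        then PySem.List.pySetD l (j : Int) (PySem.List.pyGetD bus_index i 0)
        else l) lst
    = (PySem.List.pyRange 0 (PySem.List.len (bus_i.zip bus_index)) 1).foldl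
      (fun l i =>
        (fun l p => if l.getD j 0 = (p : Int × Int).1 then l.set j p.2 else l) l
          (PySem.List.pyGetD (bus_i.zip bus_index) i (0, 0))) lst := by
    rw [show PySem.List.len (bus_i.zip bus_index) = PySem.List.len bus_i by
      simp [PySem.List.len_eq, hzlen]]
    apply PySem.List.foldl_congr_mem
    intro l i hi
    have hir : 0 ≤ i ∧ i < bus_i.length := by
      have := (PySem.List.mem_pyRange_one).1 hi
      simp [PySem.List.len_eq] at this
      omega
    have hz : PySem.List.pyGetD (bus_i.zip bus_index) i (0, 0)
        = (bus_i[i.toNat], bus_index[i.toNat]) := by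
      rw [PySem.List.pyGetD_eq_getElem _ (0,0) hir.1 (by simp [hzlen]; omega)]
      exact List.getElem_zip
    rw [hz]
    rw [PySem.List.pyGetD_eq_getElem bus_i 0 hir.1 (by exact_mod_cast hir.2),
        PySem.List.pyGetD_eq_getElem bus_index 0 hir.1 (by omega)]
    simp [PySem.List.pyGetD_natCast, PySem.List.pySetD_natCast]
  rw [hbody, PySem.List.foldl_pyRange_zero_pyGetD (bus_i.zip bus_index) (0,0)
    (fun l p => if l.getD j 0 = p.1 then l.set j p.2 else l) lst]
  exact busFoldPairs_eq_set _ lst j hj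

-- set / getD at the junction of an append (specific shapes the pass invariant needs)

theorem busSetMid (A B : List Int) (x v : Int) (k : Nat) (h : A.length = k) :
    (A ++ x :: B).set k v = A ++ v :: B := by subst h; simp

theorem busGetDMid (A B : List Int) (x : Int) (k : Nat) (h : A.length = k) :
    (A ++ x :: B).getD k 0 = x := by subst h; simp

theorem busPassA_aux (bus_index bus_i lst : List Int)
    (hle : bus_i.length <= bus_index.length) (k : Nat) (hk : k <= lst.length) :
    (PySem.List.pyRange 0 (k : Int) 1).foldl (busInnerA bus_index bus_i) lst
      = (lst.take k).map (busChainB (bus_i.zip bus_index)) ++ lst.drop k := by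
  induction k with
  | zero => simp [PySem.List.pyRange_one_eq_nil]
  | succ k ih =>
    have hklt : k < lst.length := by omega
    have hstep : ((k + 1 : Nat) : Int) = (k : Int) + 1 := by push_cast; ring
    rw [hstep, PySem.List.pyRange_one_succ_right (by positivity), List.foldl_append,
        List.foldl_cons, List.foldl_nil, ih (by omega)]
    have hAlen : ((lst.take k).map (busChainB (bus_i.zip bus_index))).length = k := by
      simp; omega
    rw [List.drop_eq_getElem_cons hklt]
    have hslen : k < ((lst.take k).map (busChainB (bus_i.zip bus_index))
        ++ lst[k] :: lst.drop (k + 1)).length := by simp; omega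
    rw [busInnerA_eq bus_index bus_i _ k hle hslen,
        busGetDMid _ _ _ _ hAlen, busSetMid _ _ _ _ _ hAlen,
        List.take_succ_eq_append_getElem hklt]
    simp
    rw [List.take_succ_eq_append_getElem (by simpa using hklt)]
    simp

theorem busPassA_eq_map (bus_index bus_i lst : List Int)
    (hle : bus_i.length <= bus_index.length) :
    busPassA bus_index bus_i lst = lst.map (busChainB (bus_i.zip bus_index)) := by
  unfold busPassA
  rw [show PySem.List.len lst = ((lst.length : Nat) : Int) by simp [PySem.List.len_eq]]
  rw [busPassA_aux bus_index bus_i lst hle lst.length (le_refl _)]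
  simp

-- the backward-built table realises the in-order substitution chain
theorem busTableB_getD (pairs : List (Int × Int)) (v : Int) :
    PySem.Dict.getD
      (pairs.reverse.foldl
        (fun d p => PySem.Dict.insert d p.1 (PySem.Dict.getD d p.2 p.2)) PySem.Dict.empty)
      v v = busChainB pairs v := by
  rw [List.foldl_reverse]
  induction pairs generalizing v with
  | nil => simp [busChainB, PySem.Dict.getD_empty]
  | cons p ps ih =>
    rw [List.foldr_cons]
    have hchain : busChainB (p :: ps) v = busChainB ps (if v = p.1 then p.2 else v) := by
      simp [busChainB]
    rw [hchain, PySem.Dict.getD_insert]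
    by_cases h : v = p.1
    · rw [if_pos h, if_pos h, ih p.2]
    · rw [if_neg h, if_neg h, ih v]

-- ===== VERDICT (by name: the statement is the Claim_ definition above) =====
theorem bus_remap_spec : Claim_equal_bus_remap := by
  intro bus_index bus_i tlist flist _ hpre
  unfold Spec_bus_remap bus_remap bus_remap_alt busTableB
  simp only [busPassA_eq_map bus_index bus_i tlist hpre,
    busPassA_eq_map bus_index bus_i flist hpre]
  exact Prod.ext_iff.mpr ⟨List.map_congr_left (fun v _ => (busTableB_getD _ v).symm),
    List.map_congr_left (fun v _ => (busTableB_getD _ v).symm)⟩
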